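-- pv_equiv track=rewrite | github.com/vicre/api.security.ait.dtu.dk | backend/myview/views.py | _normalise_scope_codes
-- ===== SOURCE A (Python) =====
-- def _normalise_scope_codes(values) -> set[str]:
--     codes: set[str] = set()
--     for value in values:
--         if value is None:
--             continue
--         normalised = str(value).replace(";", ",")
--         for code in normalised.split(","):
--             candidate = code.strip().upper()
--             if candidate:
--                 codes.add(candidate)
--     return codes
-- ===== SOURCE B (Python) =====
-- def _normalise_scope_codes(values) -> set[str]:
--     codes: set[str] = set()
--     for value in values:
--         if value is None:
--             continue
--         buf = []   # current token: left-trimmed, uppercased as built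
--         pend = []  # internal whitespace not yet known to be internal
--         for ch in str(value):
--             if ch in ",;":
--                 if buf:
--                     codes.add("".join(buf))
--                 buf = []
--                 pend = []
--             elif ch.isspace():
--                 if buf:
--                     pend.append(ch)
--             else:
--                 buf.extend(pend)
--                 pend = []
--                 buf.append(ch.upper())
--         if buf:
--             codes.add("".join(buf))
--     return codes
-- ===== Notes on version B (the rewrite author's own statement) =====
-- stated objective: alternative
-- what changed: Replaces A's library-call pipeline (replace ';'->',' then split(','), strip(), upper() per token) by a single character-level state machine that scans each value once, building trimmed uppercased tokens directly with a buffer and a pending-whitespace accumulator and flushing at ',' or ';'.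
import Mathlib
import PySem

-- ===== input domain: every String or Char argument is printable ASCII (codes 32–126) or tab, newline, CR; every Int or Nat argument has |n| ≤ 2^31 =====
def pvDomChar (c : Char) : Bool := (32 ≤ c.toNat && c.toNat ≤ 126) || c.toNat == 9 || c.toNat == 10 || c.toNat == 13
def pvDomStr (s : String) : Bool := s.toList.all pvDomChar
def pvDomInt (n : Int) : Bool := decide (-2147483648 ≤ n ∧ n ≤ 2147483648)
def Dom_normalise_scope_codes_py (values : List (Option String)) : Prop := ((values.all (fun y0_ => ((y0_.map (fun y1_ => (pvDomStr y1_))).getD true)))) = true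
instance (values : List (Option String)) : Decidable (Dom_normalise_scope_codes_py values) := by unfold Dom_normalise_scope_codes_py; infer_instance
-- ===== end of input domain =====

-- B replaces A's library-call pipeline (replace ';'→',', split on ',', strip/upper per token)
-- by a single character-level state machine per value: a token buffer and a pending-whitespace
-- accumulator, flushed at ',' or ';' (objective: alternative decomposition, same cost).

-- ===== PORT A =====
-- inner loop body of A: candidate = code.strip().upper(); if candidate: codes.add(candidate)
def pvInnerA (codes : PySem.Set String) (code : String) : PySem.Set String :=
  let candidate := PySem.Str.upper (PySem.Str.strip code)
  if candidate ≠ "" then PySem.Set.add codes candidate else codes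

def normalise_scope_codes_py (values : List (Option String)) : List String :=
  values.foldl (fun codes value =>
    match value with
    | none => codes
    | some v =>
        let normalised := PySem.Str.replace v ";" ","
        -- split(","): sep is the nonempty literal ",", so split? is always some
        ((PySem.Str.split? normalised ",").getD []).foldl pvInnerA codes) []

-- ===== PORT B =====
-- the body of B's inner character loop: state = (codes, buf, pend)
-- (ch.upper() / ch.isspace() on one char = PySem.Chars.upperChar / isspace)
def pvCharStep (st : PySem.Set String × List Char × List Char) (ch : Char) :
    PySem.Set String × List Char × List Char :=
  let (codes, buf, pend) := st
  if ch = ',' ∨ ch = ';' then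
    (if buf ≠ [] then PySem.Set.add codes (String.ofList buf) else codes, [], [])
  else if PySem.Chars.isspace ch then
    (codes, buf, if buf ≠ [] then pend ++ [ch] else pend)
  else
    (codes, buf ++ pend ++ [PySem.Chars.upperChar ch], [])

def normalise_scope_codes_py_alt (values : List (Option String)) : List String :=
  values.foldl (fun codes value =>
    match value with
    | none => codes
    | some v =>
        let st := v.toList.foldl pvCharStep (codes, [], [])
        -- trailing flush: if buf: codes.add(''.join(buf))
        if st.2.1 ≠ [] then PySem.Set.add st.1 (String.ofList st.2.1) else st.1) []

-- ===== PRECONDITION & SPEC =====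
def Spec_normalise_scope_codes_py (values : List (Option String)) (out : List String) : Prop := out = normalise_scope_codes_py_alt values
instance (values : List (Option String)) (out : List String) : Decidable (Spec_normalise_scope_codes_py values out) := by unfold Spec_normalise_scope_codes_py; infer_instance

-- ===== CLAIM (what is proved, stated in full; the proofs are below) =====
def Claim_equal_normalise_scope_codes_py : Prop := ∀ (values : List (Option String)), Dom_normalise_scope_codes_py values → Spec_normalise_scope_codes_py values (normalise_scope_codes_py values)

-- ===== LEMMAS AND PROOFS =====

-- the character map performed by A's replace(';', ',')
def pvR (c : Char) : Char := if c = ';' then ',' else c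

-- splitting a char list on a single comma (A, after replacement)
def pvSplit : List Char → List (List Char)
  | [] => [[]]
  | c :: rest =>
    if c = ',' then [] :: pvSplit rest
    else match pvSplit rest with
      | [] => [[c]]
      | t :: ts => (c :: t) :: ts

-- splitting on ',' or ';' (the delimiters B flushes at)
def pvSplit2 : List Char → List (List Char)
  | [] => [[]]
  | c :: rest =>
    if c = ',' ∨ c = ';' then [] :: pvSplit2 rest
    else match pvSplit2 rest with
      | [] => [[c]]
      | t :: ts => (c :: t) :: ts

def pvConsHead (p : List Char) : List (List Char) → List (List Char)
  | [] => [p]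
  | t :: ts => (p ++ t) :: ts

-- common token semantics both ports reduce to
def pvEmit (codes : PySem.Set String) (b : List Char) : PySem.Set String :=
  if b ≠ [] then PySem.Set.add codes (String.ofList b) else codes

def pvEmitTok (codes : PySem.Set String) (t : List Char) : PySem.Set String :=
  pvEmit codes ((PySem.Chars.strip t).map PySem.Chars.upperChar)

-- === A-side lemmas (split / replace characterisation) ===

theorem pvSplit_ne_nil (l : List Char) : pvSplit l ≠ [] := by
  induction l with
  | nil => simp [pvSplit]
  | cons c rest ih =>
      simp only [pvSplit]
      split
      · simp
      · cases h : pvSplit rest with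
        | nil => simp
        | cons t ts => simp

theorem pvSplit2_ne_nil (l : List Char) : pvSplit2 l ≠ [] := by
  induction l with
  | nil => simp [pvSplit2]
  | cons c rest ih =>
      simp only [pvSplit2]
      split
      · simp
      · cases h : pvSplit2 rest with
        | nil => simp
        | cons t ts => simp

theorem pvGo_eq : ∀ (fuel : Nat) (l cur : List Char) (acc : List (List Char)),
    l.length ≤ fuel →
    PySem.Chars.splitOn.go [','] fuel l cur acc = acc.reverse ++ pvConsHead cur.reverse (pvSplit l) := by
  intro fuel
  induction fuel with
  | zero =>
      intro l cur acc h
      have hl : l = [] := List.eq_nil_of_length_eq_zero (Nat.le_zero.mp h)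
      subst hl
      simp [PySem.Chars.splitOn.go, pvSplit, pvConsHead]
  | succ n ih =>
      intro l cur acc h
      cases l with
      | nil => simp [PySem.Chars.splitOn.go, pvSplit, pvConsHead]
      | cons c rest =>
          by_cases hc : c = ','
          · subst hc
            have hpre : List.isPrefixOf [','] (',' :: rest) = true := by
              simp [List.isPrefixOf]
            rw [show PySem.Chars.splitOn.go [','] (n+1) (',' :: rest) cur acc
                  = PySem.Chars.splitOn.go [','] n rest [] (cur.reverse :: acc) from by
                  simp [PySem.Chars.splitOn.go, hpre]]
            rw [ih rest [] (cur.reverse :: acc) (by simpa using Nat.lt_succ_iff.mp (by simpa using h))]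
            cases hs : pvSplit rest with
            | nil => exact absurd hs (pvSplit_ne_nil rest)
            | cons t ts => simp [pvSplit, pvConsHead, hs]
          · have hpre : List.isPrefixOf [','] (c :: rest) = false := by
              simp [List.isPrefixOf]
              intro hcc; exact hc hcc.symm
            rw [show PySem.Chars.splitOn.go [','] (n+1) (c :: rest) cur acc
                  = PySem.Chars.splitOn.go [','] n rest (c :: cur) acc from by
                  simp [PySem.Chars.splitOn.go, hpre]]
            rw [ih rest (c :: cur) acc (by simpa using Nat.lt_succ_iff.mp (by simpa using h))]
            cases hs : pvSplit rest with
            | nil => exact absurd hs (pvSplit_ne_nil rest)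
            | cons t ts => simp [pvSplit, hc, pvConsHead, hs]

theorem pvSplitOn_eq (s : List Char) : PySem.Chars.splitOn s [','] = pvSplit s := by
  unfold PySem.Chars.splitOn
  rw [pvGo_eq (s.length + 1) s [] [] (Nat.le_succ _)]
  cases hs : pvSplit s with
  | nil => exact absurd hs (pvSplit_ne_nil s)
  | cons t ts => simp [pvConsHead]

-- replace(';', ',') is the character map pvR
theorem pvReplaceGo_eq : ∀ (fuel : Nat) (l acc : List Char), l.length ≤ fuel →
    PySem.Chars.replace.go [';'] [','] fuel l acc = acc.reverse ++ l.map pvR := by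
  intro fuel
  induction fuel with
  | zero =>
      intro l acc h
      have hl : l = [] := List.eq_nil_of_length_eq_zero (Nat.le_zero.mp h)
      subst hl
      simp [PySem.Chars.replace.go]
  | succ n ih =>
      intro l acc h
      cases l with
      | nil => simp [PySem.Chars.replace.go]
      | cons c rest =>
          by_cases hc : c = ';'
          · subst hc
            have hpre : List.isPrefixOf [';'] (';' :: rest) = true := by
              simp [List.isPrefixOf]
            rw [show PySem.Chars.replace.go [';'] [','] (n+1) (';' :: rest) acc
                  = PySem.Chars.replace.go [';'] [','] n rest (',' :: acc) from by
                  simp [PySem.Chars.replace.go, hpre]]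
            rw [ih rest (',' :: acc) (by simpa using Nat.lt_succ_iff.mp (by simpa using h))]
            simp [pvR]
          · have hpre : List.isPrefixOf [';'] (c :: rest) = false := by
              simp [List.isPrefixOf]
              intro hcc; exact hc hcc.symm
            rw [show PySem.Chars.replace.go [';'] [','] (n+1) (c :: rest) acc
                  = PySem.Chars.replace.go [';'] [','] n rest (c :: acc) from by
                  simp [PySem.Chars.replace.go, hpre]]
            rw [ih rest (c :: acc) (by simpa using Nat.lt_succ_iff.mp (by simpa using h))]
            simp [pvR, hc]

theorem pvReplaceC (cs : List Char) : PySem.Chars.replace cs [';'] [','] = cs.map pvR := by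
  unfold PySem.Chars.replace
  rw [if_neg (by simp)]
  exact pvReplaceGo_eq cs.length cs [] (le_refl _)

-- splitting the replaced string on ',' = splitting the original on ',' or ';'
theorem pvSplit_map_pvR (cs : List Char) : pvSplit (cs.map pvR) = pvSplit2 cs := by
  induction cs with
  | nil => simp [pvSplit, pvSplit2]
  | cons c rest ih =>
      by_cases hc : c = ',' ∨ c = ';'
      · have hr : pvR c = ',' := by
          rcases hc with h | h <;> simp [pvR, h]
        simp [pvSplit, pvSplit2, hr, hc, ih]
      · have hr : pvR c = c := by
          simp [pvR]; intro h; exact absurd (Or.inr h) hc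
        have hcc : ¬ c = ',' := fun h => hc (Or.inl h)
        cases hs : pvSplit2 rest with
        | nil => exact absurd hs (pvSplit2_ne_nil rest)
        | cons t ts =>
            simp only [List.map_cons, pvSplit, pvSplit2, hr, if_neg hcc, if_neg hc, ih, hs]

-- A's token body is pvEmitTok
theorem pvInnerA_eq (codes : PySem.Set String) (t : List Char) :
    pvInnerA codes (String.ofList t) = pvEmitTok codes t := by
  unfold pvInnerA pvEmitTok pvEmit
  have hc : (PySem.Str.upper (PySem.Str.strip (String.ofList t)))
      = String.ofList ((PySem.Chars.strip t).map PySem.Chars.upperChar) := by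
    simp [PySem.Str.upper, PySem.Str.strip, PySem.Chars.upper]
  rw [hc]
  by_cases hb : (PySem.Chars.strip t).map PySem.Chars.upperChar = []
  · simp [hb]
  · have hne : String.ofList ((PySem.Chars.strip t).map PySem.Chars.upperChar) ≠ "" := by
      intro h
      have h2 := congrArg String.toList h
      simp at h2
      exact hb (by rw [h2]; rfl)
    simp [hb, hne]

-- A's per-value processing in terms of pvSplit2 / pvEmitTok
theorem pvAval (v : String) (codes : PySem.Set String) :
    ((PySem.Str.split? (PySem.Str.replace v ";" ",") ",").getD []).foldl pvInnerA codes
    = (pvSplit2 v.toList).foldl pvEmitTok codes := by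
  have hsep : (",".toList : List Char) = [','] := by decide
  have hsc : (";".toList : List Char) = [';'] := by decide
  have hs : ((PySem.Str.split? (PySem.Str.replace v ";" ",") ",").getD [])
      = (pvSplit2 v.toList).map String.ofList := by
    simp [PySem.Str.split?, PySem.Chars.split?, hsep, hsc, pvSplitOn_eq,
      PySem.Str.toList_replace, pvReplaceC, pvSplit_map_pvR]
  rw [hs, List.foldl_map]
  have hf : (fun (codes : PySem.Set String) t => pvInnerA codes (String.ofList t)) = pvEmitTok :=
    funext fun codes => funext fun t => pvInnerA_eq codes t
  rw [hf]

-- === B-side lemmas (scan characterisation) ===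

theorem pvUpper_space {c : Char} (h : PySem.Chars.isspace c = true) :
    PySem.Chars.upperChar c = c := by
  unfold PySem.Chars.upperChar
  have hlow : PySem.Chars.islower c = false := by
    unfold PySem.Chars.isspace at h
    unfold PySem.Chars.islower
    simp only [Bool.or_eq_true, Bool.and_eq_true, decide_eq_true_eq] at h
    simp only [Bool.and_eq_false_iff, decide_eq_false_iff_not, Char.not_le, Char.lt_def,
      UInt32.lt_iff_toNat_lt]
    have hc : c.toNat = c.val.toNat := rfl
    rw [hc] at h
    have ha : ('a' : Char).val.toNat = 97 := rfl
    have hz : ('z' : Char).val.toNat = 122 := rfl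
    omega
  simp [hlow]

theorem pvRstrip_spaces {p : List Char} (h : ∀ c ∈ p, PySem.Chars.isspace c = true) :
    PySem.Chars.rstrip p = [] := by
  unfold PySem.Chars.rstrip
  have : p.reverse.dropWhile PySem.Chars.isspace = [] := by
    rw [List.dropWhile_eq_nil_iff]
    intro c hc
    exact h c (List.mem_reverse.mp hc)
  simp [this]

theorem pvRstrip_append_nonspace (xs t : List Char) (c : Char)
    (hc : PySem.Chars.isspace c = false) :
    PySem.Chars.rstrip (xs ++ c :: t) = xs ++ c :: PySem.Chars.rstrip t := by
  unfold PySem.Chars.rstrip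
  rw [show (xs ++ c :: t).reverse = t.reverse ++ (c :: xs.reverse) by simp,
    List.dropWhile_append]
  split
  · next he =>
      rw [show List.dropWhile PySem.Chars.isspace (c :: xs.reverse) = c :: xs.reverse from by
        simp [hc]]
      have ht : t.reverse.dropWhile PySem.Chars.isspace = [] := by
        simpa [List.isEmpty_iff] using he
      simp [ht]
  · simp

-- the state formula: what B's buffer look like after scanning token chars t from (buf, pend)
def pvF (buf pend t : List Char) : List Char :=
  if buf = [] then (PySem.Chars.strip t).map PySem.Chars.upperChar
  else buf ++ (PySem.Chars.rstrip (pend ++ t)).map PySem.Chars.upperChar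

-- flush of the final state
def pvFinish (st : PySem.Set String × List Char × List Char) : PySem.Set String :=
  if st.2.1 ≠ [] then PySem.Set.add st.1 (String.ofList st.2.1) else st.1

theorem pvStrip_cons_space {c : Char} (t : List Char) (hc : PySem.Chars.isspace c = true) :
    PySem.Chars.strip (c :: t) = PySem.Chars.strip t := by
  unfold PySem.Chars.strip PySem.Chars.lstrip
  rw [List.dropWhile_cons_of_pos hc]

theorem pvStrip_cons_nonspace {c : Char} (t : List Char) (hc : PySem.Chars.isspace c = false) :
    PySem.Chars.strip (c :: t) = c :: PySem.Chars.rstrip t := by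
  unfold PySem.Chars.strip PySem.Chars.lstrip
  rw [List.dropWhile_cons_of_neg (by simp [hc])]
  exact pvRstrip_append_nonspace [] t c hc

theorem pvMap_upper_spaces {p : List Char} (h : ∀ c ∈ p, PySem.Chars.isspace c = true) :
    p.map PySem.Chars.upperChar = p := by
  have h2 := List.map_congr_left (g := id) (fun c hc => pvUpper_space (h c hc))
  simpa using h2

-- pvEmit of the end-of-token formula collapses to pvEmit of the bare buffer
theorem pvF_nil (codes : PySem.Set String) (buf pend : List Char)
    (hp : ∀ c ∈ pend, PySem.Chars.isspace c = true) :
    pvEmit codes (pvF buf pend []) = pvEmit codes buf := by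
  unfold pvF
  by_cases hb : buf = []
  · simp [hb, pvEmit, PySem.Chars.strip, PySem.Chars.lstrip, PySem.Chars.rstrip]
  · rw [if_neg hb, List.append_nil, pvRstrip_spaces hp]
    simp [pvEmit, hb]

-- main scan lemma: the char-state-machine fold equals the token fold
theorem pvScan : ∀ (cs : List Char) (codes : PySem.Set String) (buf pend : List Char),
    (∀ c ∈ pend, PySem.Chars.isspace c = true) → (pend = [] ∨ buf ≠ []) →
    pvFinish (cs.foldl pvCharStep (codes, buf, pend))
    = match pvSplit2 cs with
      | [] => codes
      | t :: ts => ts.foldl pvEmitTok (pvEmit codes (pvF buf pend t)) := by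
  intro cs
  induction cs with
  | nil =>
      intro codes buf pend hp _
      simp only [List.foldl_nil, pvSplit2]
      rw [pvF_nil codes buf pend hp]
      unfold pvFinish pvEmit
      rfl
  | cons c rest ih =>
      intro codes buf pend hp hbp
      by_cases hd : c = ',' ∨ c = ';'
      · -- delimiter: flush and reset
        have hstep : pvCharStep (codes, buf, pend) c
            = (pvEmit codes buf, [], []) := by
          simp [pvCharStep, hd, pvEmit]
        rw [List.foldl_cons, hstep,
          ih (pvEmit codes buf) [] [] (by simp) (Or.inl rfl)]
        cases hs : pvSplit2 rest with
        | nil => exact absurd hs (pvSplit2_ne_nil rest)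
        | cons t ts =>
            simp only [pvSplit2, if_pos hd, hs, List.foldl_cons]
            rw [pvF_nil codes buf pend hp]
            rfl
      · by_cases hsp : PySem.Chars.isspace c = true
        · -- whitespace: hold in pend (only when a token has started)
          have hstep : pvCharStep (codes, buf, pend) c
              = (codes, buf, if buf ≠ [] then pend ++ [c] else pend) := by
            simp [pvCharStep, hd, hsp]
          rw [List.foldl_cons, hstep]
          by_cases hb : buf = []
          · have hpe : pend = [] := by
              rcases hbp with h | h
              · exact h
              · exact absurd hb h
            rw [if_neg (by simp [hb]), hpe,
              ih codes buf [] (by simp) (Or.inl rfl)]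
            cases hs : pvSplit2 rest with
            | nil => exact absurd hs (pvSplit2_ne_nil rest)
            | cons t ts =>
                simp only [pvSplit2, if_neg hd, hs]
                have hF : pvF buf [] t = pvF buf [] (c :: t) := by
                  unfold pvF
                  rw [if_pos hb, if_pos hb, pvStrip_cons_space t hsp]
                rw [hF]
          · have hpend' : ∀ x ∈ pend ++ [c], PySem.Chars.isspace x = true := by
              intro x hx
              rcases List.mem_append.mp hx with h | h
              · exact hp x h
              · rw [List.mem_singleton.mp h]; exact hsp
            rw [if_pos (by simp [hb]),
              ih codes buf (pend ++ [c]) hpend' (Or.inr hb)]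
            cases hs : pvSplit2 rest with
            | nil => exact absurd hs (pvSplit2_ne_nil rest)
            | cons t ts =>
                simp only [pvSplit2, if_neg hd, hs]
                have hF : pvF buf (pend ++ [c]) t = pvF buf pend (c :: t) := by
                  unfold pvF
                  rw [if_neg hb, if_neg hb, List.append_assoc]
                  rfl
                rw [hF]
        · -- ordinary character: flush pend into buf, append its uppercase
          have hsp' : PySem.Chars.isspace c = false := by
            simpa using hsp
          have hstep : pvCharStep (codes, buf, pend) c
              = (codes, buf ++ pend ++ [PySem.Chars.upperChar c], []) := by
            simp [pvCharStep, hd, hsp']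
          rw [List.foldl_cons, hstep,
            ih codes (buf ++ pend ++ [PySem.Chars.upperChar c]) [] (by simp) (Or.inl rfl)]
          cases hs : pvSplit2 rest with
          | nil => exact absurd hs (pvSplit2_ne_nil rest)
          | cons t ts =>
              simp only [pvSplit2, if_neg hd, hs]
              have hF : pvF (buf ++ pend ++ [PySem.Chars.upperChar c]) [] t
                  = pvF buf pend (c :: t) := by
                unfold pvF
                rw [if_neg (by simp)]
                by_cases hb : buf = []
                · have hpe : pend = [] := by
                    rcases hbp with h | h
                    · exact h
                    · exact absurd hb h
                  rw [if_pos hb, hb, hpe, pvStrip_cons_nonspace t hsp']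
                  simp
                · rw [if_neg hb, List.nil_append,
                    pvRstrip_append_nonspace pend t c hsp']
                  simp [pvMap_upper_spaces hp]
              rw [hF]

-- per-value: B's scan = token fold, matching pvAval
theorem pvBval (v : String) (codes : PySem.Set String) :
    pvFinish (v.toList.foldl pvCharStep (codes, [], []))
    = (pvSplit2 v.toList).foldl pvEmitTok codes := by
  rw [pvScan v.toList codes [] [] (by simp) (Or.inl rfl)]
  cases hs : pvSplit2 v.toList with
  | nil => exact absurd hs (pvSplit2_ne_nil _)
  | cons t ts =>
      simp [pvF, pvEmitTok]

-- both ports agree fold-by-fold over the values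
theorem pvMain (values : List (Option String)) : ∀ (codes : PySem.Set String),
    values.foldl (fun codes value =>
      match value with
      | none => codes
      | some v =>
          ((PySem.Str.split? (PySem.Str.replace v ";" ",") ",").getD []).foldl pvInnerA codes) codes
    = values.foldl (fun codes value =>
      match value with
      | none => codes
      | some v =>
          let st := v.toList.foldl pvCharStep (codes, [], [])
          if st.2.1 ≠ [] then PySem.Set.add st.1 (String.ofList st.2.1) else st.1) codes := by
  induction values with
  | nil => intro codes; rfl
  | cons v values ih =>
      intro codes
      cases v with
      | none => exact ih codes
      | some v =>
          simp only [List.foldl_cons]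
          rw [pvAval, ← pvBval]
          exact ih _

-- ===== VERDICT (by name: the statement is the Claim_ definition above) =====
theorem normalise_scope_codes_py_spec : Claim_equal_normalise_scope_codes_py := by
  intro values _
  unfold Spec_normalise_scope_codes_py normalise_scope_codes_py normalise_scope_codes_py_alt
  exact pvMain values []
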